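-- pv_equiv track=rewrite | github.com/danielissing/euler | benchmarking/100_percent/solution_chat.py | parity_factor
-- ===== SOURCE A (Python) =====
-- MOD = 998244353
--
-- def parity_factor(N):
--     """
--     (1/2) * ( ∏_{t≥0} (1 - q^{2^t})^{-1} + ∏_{t≥0} (1 + q^{2^t})^{-1} )
--     computed to degree N using residue-class DP per step.
--     """
--     dp_plus = [0] * (N + 1)   # for 1/(1 - x^w)
--     dp_plus[0] = 1
--     dp_minus = [0] * (N + 1)  # for 1/(1 + x^w)
--     dp_minus[0] = 1
--     inv2 = (MOD + 1) // 2
--     w = 1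
--     while w <= N:
--         # multiply by 1/(1 - x^w): prefix sums along residue classes mod w
--         for r in range(w):
--             limit = (N - r) // w
--             s = 0
--             pos = r
--             for _ in range(limit + 1):
--                 s = (s + dp_plus[pos]) % MOD
--                 dp_plus[pos] = s
--                 pos += w
--         # multiply by 1/(1 + x^w): alternating prefix sums
--         for r in range(w):
--             limit = (N - r) // w
--             s = 0
--             pos = r
--             for _ in range(limit + 1):
--                 s = (dp_minus[pos] - s) % MOD  # s_j = a_j - s_{j-1}
--                 dp_minus[pos] = s
--                 pos += w
--         if w > N // 2:
--             break
--         w <<= 1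
--     return [(dp_plus[i] + dp_minus[i]) * inv2 % MOD for i in range(N + 1)]
-- ===== SOURCE B (Python) =====
-- MOD = 998244353
--
-- def parity_factor(N):
--     """
--     Same series to degree N in O(N): the binary-partition numbers b satisfy
--     b(n) = b(n-1) + b(n//2) for even n and b(n) = b(n-1) for odd n, and the
--     minus product telescopes to 1 - q, so the answer is (b(i) + [1,-1,0,...][i]) / 2.
--     """
--     inv2 = (MOD + 1) // 2
--     b = [1] * (N + 1)
--     for n in range(1, N + 1):
--         b[n] = (b[n - 1] + b[n >> 1]) % MOD if n % 2 == 0 else b[n - 1]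
--     out = []
--     for i, x in enumerate(b):
--         c = 1 if i == 0 else (-1 if i == 1 else 0)
--         out.append((x + c) * inv2 % MOD)
--     return out
-- ===== Notes on version B (the rewrite author's own statement) =====
-- stated objective: faster
-- what changed: A multiplies the two power series by every factor (1±q^{2^t}) with residue-class prefix-sum DP passes; B instead fills one array with the binary-partition recurrence b(n)=b(n-1)+[n even]b(n/2) and uses that the minus-product telescopes to the closed form 1-q, so all series passes disappear.
import Mathlib
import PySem

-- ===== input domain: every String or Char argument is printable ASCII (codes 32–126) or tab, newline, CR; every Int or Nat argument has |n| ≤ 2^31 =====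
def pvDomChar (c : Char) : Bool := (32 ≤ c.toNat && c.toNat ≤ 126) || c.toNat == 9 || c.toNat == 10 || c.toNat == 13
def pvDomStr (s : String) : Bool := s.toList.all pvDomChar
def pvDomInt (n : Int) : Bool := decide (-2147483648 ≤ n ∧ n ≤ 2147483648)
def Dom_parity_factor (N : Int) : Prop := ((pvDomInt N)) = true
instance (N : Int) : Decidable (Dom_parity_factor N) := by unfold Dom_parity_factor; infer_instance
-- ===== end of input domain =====

-- B replaces A's O(N log N) residue-class power-series DP by the O(N) binary-partition
-- recurrence b(n) = b(n-1) + [n even] b(n/2) and the telescoped minus product (1 - q).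

def pvMOD : Int := 998244353

-- ===== PORT A =====
-- inner 'for _ in range(limit + 1)' loop for 1/(1 - x^w); state (dp_plus, s, pos)
def pvPlusInner (w : Nat) : Nat → List Int → Int → Nat → List Int
  | 0, dp, _, _ => dp
  | cnt+1, dp, s, pos =>
    let s' := PySem.Int.mod (s + dp.getD pos 0) pvMOD
    pvPlusInner w cnt (dp.set pos s') s' (pos + w)

-- inner loop for 1/(1 + x^w): s_j = a_j - s_{j-1}
def pvMinusInner (w : Nat) : Nat → List Int → Int → Nat → List Int
  | 0, dp, _, _ => dp
  | cnt+1, dp, s, pos =>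
    let s' := PySem.Int.mod (dp.getD pos 0 - s) pvMOD
    pvMinusInner w cnt (dp.set pos s') s' (pos + w)

-- 'for r in range(w)' (limit = (N - r) // w, here in Nat since r < w ≤ N)
def pvPlusStep (n w : Nat) (dp : List Int) : List Int :=
  (List.range w).foldl (fun dp r => pvPlusInner w ((n - r)/w + 1) dp 0 r) dp

def pvMinusStep (n w : Nat) (dp : List Int) : List Int :=
  (List.range w).foldl (fun dp r => pvMinusInner w ((n - r)/w + 1) dp 0 r) dp

-- 'while w <= N: … ; if w > N // 2: break; w <<= 1'.  The '1 ≤ w' conjunct only makes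
-- termination evident: the loop is entered with w = 1 and w only doubles, so it always holds.
def pvLoopA (n : Nat) (w : Nat) (dpp dpm : List Int) : List Int × List Int :=
  if h : 1 ≤ w ∧ w ≤ n then
    let dpp' := pvPlusStep n w dpp
    let dpm' := pvMinusStep n w dpm
    if n / 2 < w then (dpp', dpm') else pvLoopA n (2*w) dpp' dpm'
  else (dpp, dpm)
termination_by n + 1 - w
decreasing_by omega

def parity_factor (N : Int) : List Int :=
  -- for N < 0 Python raises IndexError at 'dp_plus[0] = 1' (outside Pre_); dp sizes are N+1
  let n := N.toNat
  let dp0 := (List.replicate (n+1) (0:Int)).set 0 1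
  let inv2 := PySem.Int.floordiv (pvMOD + 1) 2
  let r := pvLoopA n 1 dp0 dp0
  (List.range (n+1)).map fun i => PySem.Int.mod ((r.1.getD i 0 + r.2.getD i 0) * inv2) pvMOD

-- ===== PORT B =====
-- body of 'for n in range(1, N + 1)': b[n] = (b[n-1] + b[n >> 1]) % MOD if n % 2 == 0 else b[n-1]
def pvBStep (b : List Int) (m : Nat) : List Int :=
  b.set m (if m % 2 = 0 then PySem.Int.mod (b.getD (m-1) 0 + b.getD (m/2) 0) pvMOD
           else b.getD (m-1) 0)

def parity_factor_alt (N : Int) : List Int :=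
  let len := (N+1).toNat        -- [1] * (N + 1) is empty when N < 0
  let inv2 := PySem.Int.floordiv (pvMOD + 1) 2
  let b := (List.range' 1 (len-1)).foldl pvBStep (List.replicate len 1)
  (PySem.List.enumerate b 0).foldl
    (fun out ix =>
      -- c = 1 if i == 0 else (-1 if i == 1 else 0), inlined
      out ++ [PySem.Int.mod ((ix.2 + (if ix.1 = 0 then 1 else if ix.1 = 1 then -1 else 0)) * inv2) pvMOD]) []

-- ===== PRECONDITION & SPEC =====
-- A raises IndexError for N < 0 ('dp_plus[0] = 1' on an empty list); everything else returns.
def Pre_parity_factor (N : Int) : Prop := 0 ≤ N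
instance (N : Int) : Decidable (Pre_parity_factor N) := by unfold Pre_parity_factor; infer_instance
def pvWitness_parity_factor : Int := 6

def Spec_parity_factor (N : Int) (out : List Int) : Prop := out = parity_factor_alt N
instance (N : Int) (out : List Int) : Decidable (Spec_parity_factor N out) := by unfold Spec_parity_factor; infer_instance

-- ===== CLAIM (what is proved, stated in full; the proofs are below) =====
def Claim_equal_parity_factor : Prop := ∀ (N : Int), Dom_parity_factor N → Pre_parity_factor N → Spec_parity_factor N (parity_factor N)

-- ===== LEMMAS AND PROOFS =====

-- pure (un-modded) counterparts of the per-w transforms: prefix sums / alternating prefix sums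
-- along residue classes mod w
def pvDelta : Nat → Int := fun i => if i = 0 then 1 else 0

def pvPm (f : Nat → Int) (w : Nat) : Nat → Int
  | i => f i + (if h : 1 ≤ w ∧ w ≤ i then pvPm f w (i - w) else 0)
termination_by i => i
decreasing_by omega

def pvAm (f : Nat → Int) (w : Nat) : Nat → Int
  | i => f i - (if h : 1 ≤ w ∧ w ≤ i then pvAm f w (i - w) else 0)
termination_by i => i
decreasing_by omega

-- the stack of plus-transforms after processing w = 2^0 … 2^t, and its predecessor
def pvG : Nat → Nat → Int
  | 0 => pvPm pvDelta 1
  | t+1 => pvPm (pvG t) (2^(t+1))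

def pvPrevG : Nat → Nat → Int
  | 0 => pvDelta
  | t+1 => pvG t

def pvH : Nat → Nat → Int
  | 0 => pvAm pvDelta 1
  | t+1 => pvAm (pvH t) (2^(t+1))

def pvPrevH : Nat → Nat → Int
  | 0 => pvDelta
  | t+1 => pvH t

-- pure binary-partition recurrence (B's b array before reduction) and the minus coefficients
def pvB : Nat → Int
  | 0 => 1
  | m+1 => pvB m + (if (m+1) % 2 = 0 then pvB ((m+1)/2) else 0)
decreasing_by all_goals omega

def pvE : Nat → Int := fun i => if i = 0 then 1 else if i = 1 then -1 else 0

-- B's stored (reduced) values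
def pvBM : Nat → Int
  | 0 => 1
  | m+1 => if (m+1) % 2 = 0 then PySem.Int.mod (pvBM m + pvBM ((m+1)/2)) pvMOD else pvBM m
decreasing_by all_goals omega

-- basic list-update facts specialized to our use
theorem pvGetD_set_ne (l : List Int) (i j : Nat) (v : Int) (h : i ≠ j) :
    (l.set i v).getD j 0 = l.getD j 0 := by
  simp [List.getD, List.getElem?_set, if_neg h]

theorem pvGetD_set_self (l : List Int) (i : Nat) (v : Int) (h : i < l.length) :
    (l.set i v).getD i 0 = v := by
  simp [List.getD, h]

theorem pvmod_eq (x : Int) : PySem.Int.mod x pvMOD = x % pvMOD :=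
  PySem.Int.mod_eq_emod_of_pos (by norm_num [pvMOD])

theorem pvPm_def (f : Nat → Int) (w i : Nat) :
    pvPm f w i = f i + (if 1 ≤ w ∧ w ≤ i then pvPm f w (i - w) else 0) := by
  rw [pvPm]; simp [dite_eq_ite]

theorem pvAm_def (f : Nat → Int) (w i : Nat) :
    pvAm f w i = f i - (if 1 ≤ w ∧ w ≤ i then pvAm f w (i - w) else 0) := by
  rw [pvAm]; simp [dite_eq_ite]

theorem pvPlusInner_length (w : Nat) :
    ∀ (cnt : Nat) (dp : List Int) (s : Int) (pos : Nat),
      (pvPlusInner w cnt dp s pos).length = dp.length := by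
  intro cnt
  induction cnt with
  | zero => intro dp s pos; rfl
  | succ c ih => intro dp s pos; rw [pvPlusInner]; simp [ih]

theorem pvMinusInner_length (w : Nat) :
    ∀ (cnt : Nat) (dp : List Int) (s : Int) (pos : Nat),
      (pvMinusInner w cnt dp s pos).length = dp.length := by
  intro cnt
  induction cnt with
  | zero => intro dp s pos; rfl
  | succ c ih => intro dp s pos; rw [pvMinusInner]; simp [ih]

theorem pvPlusInner_spec (w : Nat) (hw : 1 ≤ w) (g : Nat → Int) :
    ∀ (cnt : Nat) (dp : List Int) (s : Int) (pos : Nat),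
      (∀ j, j < cnt → pos + j*w < dp.length) →
      (∀ j, j < cnt → dp.getD (pos + j*w) 0 = PySem.Int.mod (g (pos + j*w)) pvMOD) →
      (s = PySem.Int.mod (if w ≤ pos then pvPm g w (pos - w) else 0) pvMOD) →
      ∀ i, (pvPlusInner w cnt dp s pos).getD i 0 =
        if ∃ j, j < cnt ∧ i = pos + j * w then PySem.Int.mod (pvPm g w i) pvMOD
        else dp.getD i 0 := by
  intro cnt
  induction cnt with
  | zero =>
    intro dp s pos _ _ _ i
    simp [pvPlusInner]
  | succ c ih =>
    intro dp s pos hrange hf hs i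
    have hposlen : pos < dp.length := by
      have h1 := hrange 0 (by omega)
      simpa using h1
    -- the new running value is the reduced pure prefix sum at pos
    have hkey : PySem.Int.mod (s + dp.getD pos 0) pvMOD = PySem.Int.mod (pvPm g w pos) pvMOD := by
      have h0 := hf 0 (by omega)
      simp only [Nat.zero_mul, Nat.mul_zero, Nat.add_zero] at h0
      rw [h0, hs]
      simp only [pvmod_eq]
      conv_rhs => rw [pvPm_def]
      have hiff : (1 ≤ w ∧ w ≤ pos) ↔ w ≤ pos := by omega
      rw [if_congr hiff rfl rfl, Int.emod_add_emod, Int.add_emod_emod]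
      ring_nf
    rw [pvPlusInner]
    have harith : ∀ j : Nat, (pos + w) + j*w = pos + (j+1)*w := by intro j; ring
    have ihres := ih (dp.set pos (PySem.Int.mod (s + dp.getD pos 0) pvMOD))
        (PySem.Int.mod (s + dp.getD pos 0) pvMOD) (pos + w)
        (by
          intro j hj
          rw [List.length_set, harith j]
          exact hrange (j+1) (by omega))
        (by
          intro j hj
          rw [harith j, pvGetD_set_ne _ _ _ _ (by nlinarith [hw]), hf (j+1) (by omega)])
        (by
          rw [hkey]
          have : w ≤ pos + w := by omega
          rw [if_pos this]
          simp)
        i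
    rw [ihres]
    by_cases hi : i = pos
    · have hc1 : ¬ ∃ j, j < c ∧ i = (pos + w) + j * w := by
        rintro ⟨j, _, hj2⟩
        rw [hi] at hj2
        have h3 : pos + w ≤ pos + w + j*w := Nat.le_add_right _ _
        omega
      rw [if_neg hc1, hi, pvGetD_set_self _ _ _ hposlen, hkey,
        if_pos (show ∃ j, j < c+1 ∧ pos = pos + j*w from ⟨0, by omega, by simp⟩)]
    · by_cases hex : ∃ j, j < c + 1 ∧ i = pos + j * w
      · rcases hex with ⟨j, hj1, hj2⟩
        have hj0 : j ≠ 0 := by rintro rfl; simp at hj2; omega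
        rcases Nat.exists_eq_add_of_le (Nat.one_le_iff_ne_zero.mpr hj0) with ⟨j', rfl⟩
        rw [if_pos ⟨j', by omega, by rw [hj2, harith j']; ring_nf⟩,
          if_pos ⟨1 + j', hj1, hj2⟩]
      · have hc1 : ¬ ∃ j, j < c ∧ i = (pos + w) + j * w := by
          rintro ⟨j, hj1, hj2⟩
          exact hex ⟨j+1, by omega, by rw [hj2, harith j]⟩
        rw [if_neg hc1, if_neg hex, pvGetD_set_ne _ _ _ _ (Ne.symm hi)]

theorem pvMinusInner_spec (w : Nat) (hw : 1 ≤ w) (g : Nat → Int) :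
    ∀ (cnt : Nat) (dp : List Int) (s : Int) (pos : Nat),
      (∀ j, j < cnt → pos + j*w < dp.length) →
      (∀ j, j < cnt → dp.getD (pos + j*w) 0 = PySem.Int.mod (g (pos + j*w)) pvMOD) →
      (s = PySem.Int.mod (if w ≤ pos then pvAm g w (pos - w) else 0) pvMOD) →
      ∀ i, (pvMinusInner w cnt dp s pos).getD i 0 =
        if ∃ j, j < cnt ∧ i = pos + j * w then PySem.Int.mod (pvAm g w i) pvMOD
        else dp.getD i 0 := by
  intro cnt
  induction cnt with
  | zero =>
    intro dp s pos _ _ _ i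
    simp [pvMinusInner]
  | succ c ih =>
    intro dp s pos hrange hf hs i
    have hposlen : pos < dp.length := by
      have h1 := hrange 0 (by omega)
      simpa using h1
    have hkey : PySem.Int.mod (dp.getD pos 0 - s) pvMOD = PySem.Int.mod (pvAm g w pos) pvMOD := by
      have h0 := hf 0 (by omega)
      simp only [Nat.zero_mul, Nat.mul_zero, Nat.add_zero] at h0
      rw [h0, hs]
      simp only [pvmod_eq]
      conv_rhs => rw [pvAm_def]
      have hiff : (1 ≤ w ∧ w ≤ pos) ↔ w ≤ pos := by omega
      rw [if_congr hiff rfl rfl, ← Int.sub_emod]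
    rw [pvMinusInner]
    have harith : ∀ j : Nat, (pos + w) + j*w = pos + (j+1)*w := by intro j; ring
    have ihres := ih (dp.set pos (PySem.Int.mod (dp.getD pos 0 - s) pvMOD))
        (PySem.Int.mod (dp.getD pos 0 - s) pvMOD) (pos + w)
        (by
          intro j hj
          rw [List.length_set, harith j]
          exact hrange (j+1) (by omega))
        (by
          intro j hj
          rw [harith j, pvGetD_set_ne _ _ _ _ (by nlinarith [hw]), hf (j+1) (by omega)])
        (by
          rw [hkey]
          have : w ≤ pos + w := by omega
          rw [if_pos this]
          simp)
        i
    rw [ihres]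
    by_cases hi : i = pos
    · have hc1 : ¬ ∃ j, j < c ∧ i = (pos + w) + j * w := by
        rintro ⟨j, _, hj2⟩
        rw [hi] at hj2
        have h3 : pos + w ≤ pos + w + j*w := Nat.le_add_right _ _
        omega
      rw [if_neg hc1, hi, pvGetD_set_self _ _ _ hposlen, hkey,
        if_pos (show ∃ j, j < c+1 ∧ pos = pos + j*w from ⟨0, by omega, by simp⟩)]
    · by_cases hex : ∃ j, j < c + 1 ∧ i = pos + j * w
      · rcases hex with ⟨j, hj1, hj2⟩
        have hj0 : j ≠ 0 := by rintro rfl; simp at hj2; omega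
        rcases Nat.exists_eq_add_of_le (Nat.one_le_iff_ne_zero.mpr hj0) with ⟨j', rfl⟩
        rw [if_pos ⟨j', by omega, by rw [hj2, harith j']; ring_nf⟩,
          if_pos ⟨1 + j', hj1, hj2⟩]
      · have hc1 : ¬ ∃ j, j < c ∧ i = (pos + w) + j * w := by
          rintro ⟨j, hj1, hj2⟩
          exact hex ⟨j+1, by omega, by rw [hj2, harith j]⟩
        rw [if_neg hc1, if_neg hex, pvGetD_set_ne _ _ _ _ (Ne.symm hi)]

theorem pvPlusStep_aux (n w : Nat) (hw : 1 ≤ w) (hwn : w ≤ n) (g : Nat → Int) (dp : List Int)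
    (hlen : dp.length = n+1)
    (hdp : ∀ i, i ≤ n → dp.getD i 0 = PySem.Int.mod (g i) pvMOD) :
    ∀ r, r ≤ w →
      ((List.range r).foldl (fun dp r => pvPlusInner w ((n - r)/w + 1) dp 0 r) dp).length = n+1 ∧
      ∀ i, i ≤ n →
        ((List.range r).foldl (fun dp r => pvPlusInner w ((n - r)/w + 1) dp 0 r) dp).getD i 0 =
          if i % w < r then PySem.Int.mod (pvPm g w i) pvMOD else PySem.Int.mod (g i) pvMOD := by
  intro r
  induction r with
  | zero =>
    intro _
    refine ⟨by simpa using hlen, ?_⟩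
    intro i hi
    simpa using hdp i hi
  | succ r ih =>
    intro hr
    obtain ⟨ihlen, ihval⟩ := ih (by omega)
    rw [List.range_succ, List.foldl_append]
    set res := (List.range r).foldl (fun dp r => pvPlusInner w ((n - r)/w + 1) dp 0 r) dp with hres
    simp only [List.foldl_cons, List.foldl_nil]
    have hrn : r ≤ n := by omega
    have hbound : ∀ j, j < (n - r)/w + 1 → r + j*w ≤ n := by
      intro j hj
      have h1 : j ≤ (n-r)/w := by omega
      have h2 : j * w ≤ ((n-r)/w) * w := Nat.mul_le_mul_right w h1
      have h3 : ((n-r)/w) * w ≤ n - r := Nat.div_mul_le_self _ _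
      omega
    have hspec := pvPlusInner_spec w hw g ((n - r)/w + 1) res 0 r
      (by intro j hj; rw [ihlen]; have := hbound j hj; omega)
      (by
        intro j hj
        have hle := hbound j hj
        have hmod : (r + j*w) % w = r := by
          rw [Nat.add_mul_mod_self_right, Nat.mod_eq_of_lt (by omega)]
        rw [ihval _ hle, hmod, if_neg (by omega)])
      (by rw [if_neg (show ¬ w ≤ r by omega)]; simp [pvmod_eq])
    constructor
    · rw [pvPlusInner_length, ihlen]
    · intro i hi
      rw [hspec i]
      have hcond : (∃ j, j < (n - r)/w + 1 ∧ i = r + j * w) ↔ i % w = r := by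
        constructor
        · rintro ⟨j, _, rfl⟩
          rw [Nat.add_mul_mod_self_right, Nat.mod_eq_of_lt (by omega)]
        · intro hmod
          have hd := Nat.div_add_mod i w
          rw [hmod] at hd
          have hge : r ≤ i := by omega
          have hmul : w * (i / w) = i - r := Nat.eq_sub_of_add_eq hd
          refine ⟨i / w, ?_, ?_⟩
          · have h4 : (i/w) * w ≤ n - r := by rw [Nat.mul_comm, hmul]; omega
            have h5 : i/w ≤ (n-r)/w := (Nat.le_div_iff_mul_le (by omega)).mpr h4
            omega
          · rw [Nat.mul_comm, hmul]; omega
      by_cases hc : i % w = r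
      · rw [if_pos (hcond.mpr hc), if_pos (by omega)]
      · rw [if_neg (fun h => hc (hcond.mp h)), ihval i hi]
        have : i % w < r + 1 ↔ i % w < r := by omega
        rw [if_congr this rfl rfl]

theorem pvMinusStep_aux (n w : Nat) (hw : 1 ≤ w) (hwn : w ≤ n) (g : Nat → Int) (dp : List Int)
    (hlen : dp.length = n+1)
    (hdp : ∀ i, i ≤ n → dp.getD i 0 = PySem.Int.mod (g i) pvMOD) :
    ∀ r, r ≤ w →
      ((List.range r).foldl (fun dp r => pvMinusInner w ((n - r)/w + 1) dp 0 r) dp).length = n+1 ∧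
      ∀ i, i ≤ n →
        ((List.range r).foldl (fun dp r => pvMinusInner w ((n - r)/w + 1) dp 0 r) dp).getD i 0 =
          if i % w < r then PySem.Int.mod (pvAm g w i) pvMOD else PySem.Int.mod (g i) pvMOD := by
  intro r
  induction r with
  | zero =>
    intro _
    refine ⟨by simpa using hlen, ?_⟩
    intro i hi
    simpa using hdp i hi
  | succ r ih =>
    intro hr
    obtain ⟨ihlen, ihval⟩ := ih (by omega)
    rw [List.range_succ, List.foldl_append]
    set res := (List.range r).foldl (fun dp r => pvMinusInner w ((n - r)/w + 1) dp 0 r) dp with hres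
    simp only [List.foldl_cons, List.foldl_nil]
    have hrn : r ≤ n := by omega
    have hbound : ∀ j, j < (n - r)/w + 1 → r + j*w ≤ n := by
      intro j hj
      have h1 : j ≤ (n-r)/w := by omega
      have h2 : j * w ≤ ((n-r)/w) * w := Nat.mul_le_mul_right w h1
      have h3 : ((n-r)/w) * w ≤ n - r := Nat.div_mul_le_self _ _
      omega
    have hspec := pvMinusInner_spec w hw g ((n - r)/w + 1) res 0 r
      (by intro j hj; rw [ihlen]; have := hbound j hj; omega)
      (by
        intro j hj
        have hle := hbound j hj
        have hmod : (r + j*w) % w = r := by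
          rw [Nat.add_mul_mod_self_right, Nat.mod_eq_of_lt (by omega)]
        rw [ihval _ hle, hmod, if_neg (by omega)])
      (by rw [if_neg (show ¬ w ≤ r by omega)]; simp [pvmod_eq])
    constructor
    · rw [pvMinusInner_length, ihlen]
    · intro i hi
      rw [hspec i]
      have hcond : (∃ j, j < (n - r)/w + 1 ∧ i = r + j * w) ↔ i % w = r := by
        constructor
        · rintro ⟨j, _, rfl⟩
          rw [Nat.add_mul_mod_self_right, Nat.mod_eq_of_lt (by omega)]
        · intro hmod
          have hd := Nat.div_add_mod i w
          rw [hmod] at hd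
          have hge : r ≤ i := by omega
          have hmul : w * (i / w) = i - r := Nat.eq_sub_of_add_eq hd
          refine ⟨i / w, ?_, ?_⟩
          · have h4 : (i/w) * w ≤ n - r := by rw [Nat.mul_comm, hmul]; omega
            have h5 : i/w ≤ (n-r)/w := (Nat.le_div_iff_mul_le (by omega)).mpr h4
            omega
          · rw [Nat.mul_comm, hmul]; omega
      by_cases hc : i % w = r
      · rw [if_pos (hcond.mpr hc), if_pos (by omega)]
      · rw [if_neg (fun h => hc (hcond.mp h)), ihval i hi]
        have : i % w < r + 1 ↔ i % w < r := by omega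
        rw [if_congr this rfl rfl]

theorem pvPlusStep_spec (n w : Nat) (hw : 1 ≤ w) (hwn : w ≤ n) (g : Nat → Int) (dp : List Int)
    (hlen : dp.length = n+1)
    (hdp : ∀ i, i ≤ n → dp.getD i 0 = PySem.Int.mod (g i) pvMOD) :
    (pvPlusStep n w dp).length = n+1 ∧
    ∀ i, i ≤ n → (pvPlusStep n w dp).getD i 0 = PySem.Int.mod (pvPm g w i) pvMOD := by
  obtain ⟨h1, h2⟩ := pvPlusStep_aux n w hw hwn g dp hlen hdp w le_rfl
  refine ⟨h1, fun i hi => ?_⟩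
  rw [pvPlusStep] at *
  rw [h2 i hi, if_pos (Nat.mod_lt _ (by omega))]

theorem pvMinusStep_spec (n w : Nat) (hw : 1 ≤ w) (hwn : w ≤ n) (g : Nat → Int) (dp : List Int)
    (hlen : dp.length = n+1)
    (hdp : ∀ i, i ≤ n → dp.getD i 0 = PySem.Int.mod (g i) pvMOD) :
    (pvMinusStep n w dp).length = n+1 ∧
    ∀ i, i ≤ n → (pvMinusStep n w dp).getD i 0 = PySem.Int.mod (pvAm g w i) pvMOD := by
  obtain ⟨h1, h2⟩ := pvMinusStep_aux n w hw hwn g dp hlen hdp w le_rfl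
  refine ⟨h1, fun i hi => ?_⟩
  rw [pvMinusStep] at *
  rw [h2 i hi, if_pos (Nat.mod_lt _ (by omega))]

theorem pvG_succ_def (t : Nat) (j : Nat) :
    pvG (t+1) j = pvG t j + (if 1 ≤ 2^(t+1) ∧ 2^(t+1) ≤ j then pvG (t+1) (j - 2^(t+1)) else 0) := by
  show pvPm (pvG t) (2^(t+1)) j = _
  rw [pvPm_def]
  rfl

theorem pvH_succ_def (t : Nat) (j : Nat) :
    pvH (t+1) j = pvH t j - (if 1 ≤ 2^(t+1) ∧ 2^(t+1) ≤ j then pvH (t+1) (j - 2^(t+1)) else 0) := by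
  show pvAm (pvH t) (2^(t+1)) j = _
  rw [pvAm_def]
  rfl

theorem pvG_eq (t : Nat) : pvG t = pvPm (pvPrevG t) (2^t) := by
  cases t <;> simp [pvG, pvPrevG, pow_zero]

theorem pvH_eq (t : Nat) : pvH t = pvAm (pvPrevH t) (2^t) := by
  cases t <;> simp [pvH, pvPrevH, pow_zero]

theorem pvPm_zero (f : Nat → Int) (w : Nat) : pvPm f w 0 = f 0 := by
  rw [pvPm_def, if_neg (by omega), add_zero]

theorem pvG_zero_arg : ∀ t, pvG t 0 = 1 := by
  intro t
  induction t with
  | zero => rw [show pvG 0 = pvPm pvDelta 1 from rfl, pvPm_zero]; rfl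
  | succ t ih => rw [pvG_succ_def, if_neg (by omega), add_zero, ih]

theorem pvG_stab (t : Nat) (i : Nat) (h : i < 2^(t+1)) : pvG (t+1) i = pvG t i := by
  rw [pvG_succ_def, if_neg (by omega), add_zero]

theorem pvPrevG_eq (t : Nat) (a : Nat) (h : a < 2^t) : pvPrevG t a = pvG t a := by
  cases t with
  | zero =>
    have : a = 0 := by simpa using h
    subst this
    rw [pvG_zero_arg]; rfl
  | succ t => exact (pvG_stab t a h).symm

theorem pvG0_const : ∀ i, pvG 0 i = 1 := by
  intro i
  induction i using Nat.strong_induction_on with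
  | _ i ih =>
    rcases i with _|m
    · exact pvG_zero_arg 0
    · show pvPm pvDelta 1 (m+1) = 1
      rw [pvPm_def, if_pos (by omega)]
      have h1 : pvPm pvDelta 1 (m+1-1) = 1 := ih m (by omega)
      simpa [pvDelta] using h1

theorem pvG_rec : ∀ t i, 1 ≤ i →
    pvG t i = pvG t (i-1) + (if i % 2 = 0 then pvPrevG t (i/2) else 0) := by
  intro t
  induction t with
  | zero =>
    intro i hi
    rw [pvG0_const, pvG0_const]
    by_cases he : i % 2 = 0
    · have h2 : 2 ≤ i := by omega
      rw [if_pos he, show pvPrevG 0 = pvDelta from rfl]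
      have : i / 2 ≠ 0 := by omega
      simp [pvDelta, this]
    · rw [if_neg he, add_zero]
  | succ t IH =>
    intro i
    induction i using Nat.strong_induction_on with
    | _ i ih =>
      intro hi
      have hWpos : 1 ≤ 2^(t+1) := Nat.one_le_two_pow
      have hW2 : 2^(t+1) = 2 * 2^t := by ring
      have htpos : 1 ≤ 2^t := Nat.one_le_two_pow
      rcases Nat.lt_trichotomy i (2^(t+1)) with hc | hc | hc
      · -- i < W
        rw [pvG_succ_def t i, if_neg (by omega), add_zero,
          pvG_succ_def t (i-1), if_neg (by omega), add_zero, IH i hi]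
        show _ = _ + (if i % 2 = 0 then pvG t (i/2) else 0)
        by_cases he : i % 2 = 0
        · rw [if_pos he, if_pos he, pvPrevG_eq t (i/2) (by omega)]
        · rw [if_neg he, if_neg he]
      · -- i = W
        subst hc
        have he : 2^(t+1) % 2 = 0 := by omega
        have hhalf : 2^(t+1) / 2 = 2^t := by omega
        have hL : pvG (t+1) (2^(t+1)) = pvG t (2^(t+1)) + 1 := by
          rw [pvG_succ_def t, if_pos (show 1 ≤ 2^(t+1) ∧ 2^(t+1) ≤ 2^(t+1) by omega),
            Nat.sub_self, pvG_zero_arg]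
        have hR : pvG (t+1) (2^(t+1) - 1) = pvG t (2^(t+1) - 1) := by
          rw [pvG_succ_def t, if_neg (by omega), add_zero]
        have hGt : pvG t (2^(t+1)) = pvG t (2^(t+1) - 1) + pvPrevG t (2^t) := by
          have h6 := IH (2^(t+1)) (by omega)
          rwa [if_pos he, hhalf] at h6
        have hGhalf : pvG t (2^t) = pvPrevG t (2^t) + 1 := by
          rw [pvG_eq t, pvPm_def, if_pos (show 1 ≤ 2^t ∧ 2^t ≤ 2^t by omega),
            Nat.sub_self, ← pvG_eq t, pvG_zero_arg]
        rw [hL, hR, hGt, if_pos he, hhalf]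
        show _ = _ + pvG t (2^t)
        rw [hGhalf]; ring
      · -- i > W
        rw [pvG_succ_def t i, if_pos (by omega),
          pvG_succ_def t (i-1), if_pos (by omega), IH i (by omega),
          ih (i - 2^(t+1)) (by omega) (by omega)]
        have hsub : i - 2^(t+1) - 1 = i - 1 - 2^(t+1) := by omega
        rw [hsub]
        show pvG t (i-1) + (if i % 2 = 0 then pvPrevG t (i/2) else 0) +
            (pvG (t+1) (i-1-2^(t+1)) + (if (i - 2^(t+1)) % 2 = 0 then pvG t ((i - 2^(t+1))/2) else 0)) =
          pvG t (i-1) + pvG (t+1) (i-1-2^(t+1)) + (if i % 2 = 0 then pvG t (i/2) else 0)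
        by_cases he : i % 2 = 0
        · have he' : (i - 2^(t+1)) % 2 = 0 := by omega
          rw [if_pos he, if_pos he, if_pos he']
          have hhalf : i/2 - 2^t = (i - 2^(t+1))/2 := by omega
          have hG : pvG t (i/2) = pvPrevG t (i/2) + pvG t (i/2 - 2^t) := by
            rw [pvG_eq t, pvPm_def, if_pos (by omega), ← pvG_eq t]
          rw [hG, hhalf]; ring
        · have he' : ¬ (i - 2^(t+1)) % 2 = 0 := by omega
          rw [if_neg he, if_neg he, if_neg he']; ring

theorem pvB_succ_def (m : Nat) :
    pvB (m+1) = pvB m + (if (m+1) % 2 = 0 then pvB ((m+1)/2) else 0) := by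
  rw [pvB]

theorem pvBM_succ_def (m : Nat) :
    pvBM (m+1) = if (m+1) % 2 = 0 then PySem.Int.mod (pvBM m + pvBM ((m+1)/2)) pvMOD
                 else pvBM m := by
  rw [pvBM]

theorem pvG_eq_pvB : ∀ i t, i < 2^(t+1) → pvG t i = pvB i := by
  intro i
  induction i using Nat.strong_induction_on with
  | _ i ih =>
    intro t hlt
    rcases i with _|m
    · rw [pvG_zero_arg, pvB]
    · have htpos : 1 ≤ 2^t := Nat.one_le_two_pow
      have hW2 : 2^(t+1) = 2 * 2^t := by ring
      rw [pvG_rec t (m+1) (by omega), pvB_succ_def]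
      simp only [Nat.add_sub_cancel]
      rw [ih m (by omega) t (by omega)]
      by_cases he : (m+1) % 2 = 0
      · have hh : (m+1)/2 < 2^t := by omega
        rw [if_pos he, if_pos he, pvPrevG_eq t _ hh,
          ih ((m+1)/2) (by omega) t (by omega)]
      · rw [if_neg he, if_neg he]

theorem pvE_ge (x : Nat) (h : 2 ≤ x) : pvE x = 0 := by
  unfold pvE
  rw [if_neg (by omega), if_neg (by omega)]

theorem pvH_zero_arg : ∀ t, pvH t 0 = 1 := by
  intro t
  induction t with
  | zero =>
    show pvAm pvDelta 1 0 = 1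
    rw [pvAm_def, if_neg (by omega), sub_zero]; rfl
  | succ t ih => rw [pvH_succ_def, if_neg (by omega), sub_zero, ih]

theorem pvH0_const : ∀ i, pvH 0 i = pvE (i % 2) := by
  intro i
  induction i using Nat.strong_induction_on with
  | _ i ih =>
    rcases i with _|m
    · rw [pvH_zero_arg]; rfl
    · show pvAm pvDelta 1 (m+1) = _
      rw [pvAm_def, if_pos (by omega)]
      simp only [Nat.add_sub_cancel]
      have h1 : pvAm pvDelta 1 m = pvE (m % 2) := ih m (by omega)
      rw [h1]
      have hd : pvDelta (m+1) = 0 := by simp [pvDelta]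
      rw [hd]
      rcases Nat.mod_two_eq_zero_or_one m with h2 | h2
      · 
        have h3 : (m+1) % 2 = 1 := by omega
        rw [h2, h3]
        show (0:Int) - pvE 0 = pvE 1
        simp [pvE]
      · have h3 : (m+1) % 2 = 0 := by omega
        rw [h2, h3]
        show (0:Int) - pvE 1 = pvE 0
        simp [pvE]

theorem pvH_mod : ∀ t i, pvH t i = pvE (i % 2^(t+1)) := by
  intro t
  induction t with
  | zero =>
    intro i
    rw [pvH0_const]
    norm_num
  | succ t IH =>
    intro i
    induction i using Nat.strong_induction_on with
    | _ i ih =>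
      have htpos : 1 ≤ 2^t := Nat.one_le_two_pow
      have hW2 : 2^(t+1) = 2 * 2^t := by ring
      have hW4 : 2^(t+2) = 2 * 2^(t+1) := by ring
      have ih' : ∀ m, m < i → pvH (t+1) m = pvE (m % 2^(t+2)) := ih
      show pvH (t+1) i = pvE (i % 2^(t+2))
      by_cases hc : i < 2^(t+1)
      · rw [pvH_succ_def, if_neg (by omega), sub_zero, IH i,
          Nat.mod_eq_of_lt hc, Nat.mod_eq_of_lt (show i < 2^(t+2) by omega)]
      · push_neg at hc
        rw [pvH_succ_def, if_pos (by omega), IH i, ih' (i - 2^(t+1)) (by omega)]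
        have hsmod : i % 2^(t+2) % 2^(t+1) = i % 2^(t+1) :=
          Nat.mod_mod_of_dvd i ⟨2, by omega⟩
        have hslt : i % 2^(t+2) < 2^(t+2) := Nat.mod_lt _ (by omega)
        have haux : i - 2^(t+1) + 2^(t+2) = i + 2^(t+1) := by omega
        have hsub : (i - 2^(t+1)) % 2^(t+2) = (i + 2^(t+1)) % 2^(t+2) := by
          rw [← haux, Nat.add_mod_right]
        have hadd : (i + 2^(t+1)) % 2^(t+2) = (i % 2^(t+2) + 2^(t+1)) % 2^(t+2) := by
          rw [Nat.add_mod, Nat.mod_eq_of_lt (show 2^(t+1) < 2^(t+2) by omega)]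
        rw [hsub, hadd]
        set s := i % 2^(t+2) with hs
        by_cases hcs : s < 2^(t+1)
        · have h5 : (s + 2^(t+1)) % 2^(t+2) = s + 2^(t+1) := Nat.mod_eq_of_lt (by omega)
          rw [h5, pvE_ge (s + 2^(t+1)) (by omega), sub_zero, ← hsmod, Nat.mod_eq_of_lt hcs]
        · push_neg at hcs
          have h5 : (s + 2^(t+1)) % 2^(t+2) = s - 2^(t+1) := by
            rw [Nat.mod_eq_sub_mod (by omega), Nat.mod_eq_of_lt (by omega)]
            omega
          have h6 : i % 2^(t+1) = s - 2^(t+1) := by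
            rw [← hsmod, Nat.mod_eq_sub_mod (by omega), Nat.mod_eq_of_lt (by omega)]
          rw [h5, h6, sub_self, pvE_ge s (by omega)]

theorem pvBM_eq : ∀ i, pvBM i = PySem.Int.mod (pvB i) pvMOD := by
  intro i
  induction i using Nat.strong_induction_on with
  | _ i ih =>
    rcases i with _|m
    · rw [pvBM, pvB, pvmod_eq]
      norm_num [pvMOD]
    · rw [pvBM_succ_def, pvB_succ_def]
      by_cases he : (m+1) % 2 = 0
      · rw [if_pos he, if_pos he, ih m (by omega), ih ((m+1)/2) (by omega)]
        simp only [pvmod_eq]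
        rw [Int.emod_add_emod, Int.add_emod_emod]
      · rw [if_neg he, if_neg he, add_zero, ih m (by omega)]

theorem pvLoopA_spec (n : Nat) : ∀ k t (dpp dpm : List Int), n - 2^t = k → 2^t ≤ n →
    dpp.length = n+1 → dpm.length = n+1 →
    (∀ i, i ≤ n → dpp.getD i 0 = PySem.Int.mod (pvPrevG t i) pvMOD) →
    (∀ i, i ≤ n → dpm.getD i 0 = PySem.Int.mod (pvPrevH t i) pvMOD) →
    ∀ i, i ≤ n → (pvLoopA n (2^t) dpp dpm).1.getD i 0 = PySem.Int.mod (pvB i) pvMOD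
               ∧ (pvLoopA n (2^t) dpp dpm).2.getD i 0 = PySem.Int.mod (pvE i) pvMOD := by
  intro k
  induction k using Nat.strong_induction_on with
  | _ k ihk =>
    intro t dpp dpm hk ht hlp hlm hdp hdm i hi
    have htpos : 1 ≤ 2^t := Nat.one_le_two_pow
    have hW2 : 2^(t+1) = 2 * 2^t := by ring
    obtain ⟨hplen, hpval⟩ := pvPlusStep_spec n (2^t) htpos ht (pvPrevG t) dpp hlp hdp
    obtain ⟨hmlen, hmval⟩ := pvMinusStep_spec n (2^t) htpos ht (pvPrevH t) dpm hlm hdm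
    have hunfold : pvLoopA n (2^t) dpp dpm =
        if n / 2 < 2^t then (pvPlusStep n (2^t) dpp, pvMinusStep n (2^t) dpm)
        else pvLoopA n (2*2^t) (pvPlusStep n (2^t) dpp) (pvMinusStep n (2^t) dpm) := by
      rw [pvLoopA, dif_pos ⟨htpos, ht⟩]
    by_cases hbr : n / 2 < 2^t
    · rw [hunfold, if_pos hbr]
      have hnlt : n < 2^(t+1) := by omega
      constructor
      · rw [hpval i hi, ← pvG_eq, pvG_eq_pvB i t (by omega)]
      · rw [hmval i hi, ← pvH_eq, pvH_mod t i, Nat.mod_eq_of_lt (by omega)]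
    · rw [hunfold, if_neg hbr]
      have h1 : 2^(t+1) ≤ n := by omega
      have h2 : (2:Nat)*2^t = 2^(t+1) := by ring
      rw [h2]
      exact ihk (n - 2^(t+1)) (by omega) (t+1) _ _ rfl h1 hplen hmlen
        (fun j hj => by rw [hpval j hj, ← pvG_eq t]; rfl)
        (fun j hj => by rw [hmval j hj, ← pvH_eq t]; rfl)
        i hi

theorem pvBFill_spec (L : Nat) : ∀ j, j ≤ L - 1 →
    ((List.range' 1 j).foldl pvBStep (List.replicate L (1:Int))).length = L ∧
    (∀ i, i ≤ j → i < L →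
      ((List.range' 1 j).foldl pvBStep (List.replicate L (1:Int))).getD i 0 = pvBM i) := by
  intro j
  induction j with
  | zero =>
    intro _
    refine ⟨by simp, ?_⟩
    intro i hi hiL
    have : i = 0 := by omega
    subst this
    rw [pvBM]
    simp [List.getD, List.getElem?_replicate, hiL]
  | succ j ihj =>
    intro hj
    obtain ⟨ihlen, ihval⟩ := ihj (by omega)
    rw [List.range'_1_concat, List.foldl_append]
    simp only [List.foldl_cons, List.foldl_nil]
    rw [show 1 + j = j + 1 from by omega]
    set res := (List.range' 1 j).foldl pvBStep (List.replicate L (1:Int)) with hres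
    have hmlt : j + 1 < L := by omega
    unfold pvBStep
    constructor
    · rw [List.length_set, ihlen]
    · intro i hi hiL
      by_cases hieq : i = j + 1
      · rw [hieq, pvGetD_set_self _ _ _ (by rw [ihlen]; exact hmlt)]
        rw [show j + 1 - 1 = j from by omega,
          ihval j (by omega) (by omega),
          ihval ((j+1)/2) (by omega) (by omega)]
        exact (pvBM_succ_def j).symm
      · rw [pvGetD_set_ne _ _ _ _ (fun h => hieq h.symm)]
        exact ihval i (by omega) hiL

theorem pvDp0_getD (n : Nat) : ∀ i, i ≤ n →
    ((List.replicate (n+1) (0:Int)).set 0 1).getD i 0 = PySem.Int.mod (pvDelta i) pvMOD := by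
  intro i hi
  rcases i with _|m
  · rw [pvGetD_set_self _ _ _ (by simp)]
    rw [pvmod_eq]
    norm_num [pvDelta, pvMOD]
  · rw [pvGetD_set_ne _ _ _ _ (by omega), pvmod_eq]
    have hd : pvDelta (m+1) = 0 := by simp [pvDelta]
    rw [hd]
    simp [List.getD, List.getElem?_replicate, Nat.lt_succ_of_le hi]

theorem pvElem (n : Nat) (b r1 r2 : List Int) (I : Int)
    (hr1 : ∀ i, i ≤ n → r1.getD i 0 = PySem.Int.mod (pvB i) pvMOD)
    (hr2 : ∀ i, i ≤ n → r2.getD i 0 = PySem.Int.mod (pvE i) pvMOD)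
    (hb : ∀ i, i ≤ n → b.getD i 0 = pvBM i) :
    ∀ i, i ≤ n →
      PySem.Int.mod ((r1.getD i 0 + r2.getD i 0) * I) pvMOD =
      PySem.Int.mod ((b.getD i 0 +
        (if (i:Int) = 0 then 1 else if (i:Int) = 1 then -1 else 0)) * I) pvMOD := by
  intro i hi
  rw [hr1 i hi, hr2 i hi, hb i hi, pvBM_eq i]
  rcases i with _|m
  · rw [show PySem.Int.mod (pvE 0) pvMOD = 1 from by decide]
    norm_num
  · rcases m with _|m
    · have h1 : PySem.Int.mod (pvE 1) pvMOD = 998244352 := by decide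
      have h2 : ¬ ((1:Nat):Int) = 0 := by norm_num
      rw [h1, if_neg h2, if_pos (by norm_num)]
      simp only [pvmod_eq]
      have key : ∀ y : Int, (y + 998244352) * I % pvMOD = (y + -1) * I % pvMOD := by
        intro y
        have h3 : (y + 998244352) * I = (y + -1) * I + I * pvMOD := by
          show _ = _ + I * 998244353
          ring
        rw [h3, Int.add_mul_emod_self_right]
      exact key _
    · have h2 : 2 ≤ m + 1 + 1 := by omega
      rw [pvE_ge _ h2]
      rw [if_neg (by omega), if_neg (by omega)]
      simp [pvmod_eq]

theorem parity_factor_main : ∀ (N : Int), 0 ≤ N → parity_factor N = parity_factor_alt N := by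
  intro N hPre
  by_cases hz : N = 0
  · subst hz
    have h0 : pvLoopA 0 1 [(1:Int)] [(1:Int)] = ([(1:Int)], [(1:Int)]) := by
      rw [pvLoopA, dif_neg (by omega)]
    show (List.range 1).map (fun i => PySem.Int.mod
        (((pvLoopA 0 1 [(1:Int)] [(1:Int)]).1.getD i 0 +
          (pvLoopA 0 1 [(1:Int)] [(1:Int)]).2.getD i 0) *
          PySem.Int.floordiv (pvMOD + 1) 2) pvMOD) =
      (PySem.List.enumerate [(1:Int)] 0).foldl
        (fun out ix => out ++ [PySem.Int.mod ((ix.2 +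
          (if ix.1 = 0 then 1 else if ix.1 = 1 then -1 else 0)) *
          PySem.Int.floordiv (pvMOD + 1) 2) pvMOD]) []
    rw [h0]
    decide
  · have hpos : 1 ≤ N.toNat := by omega
    set n := N.toNat with hn
    have hN1 : (N+1).toNat = n + 1 := by omega
    have hloop := pvLoopA_spec n (n - 2^0) 0 ((List.replicate (n+1) (0:Int)).set 0 1)
      ((List.replicate (n+1) (0:Int)).set 0 1) rfl (by simpa using hpos)
      (by simp) (by simp)
      (fun i hi => pvDp0_getD n i hi) (fun i hi => pvDp0_getD n i hi)
    norm_num at hloop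
    obtain ⟨hblen, hbval⟩ := pvBFill_spec (n+1) n (by omega)
    unfold parity_factor parity_factor_alt
    rw [← hn, hN1]
    show (List.range (n+1)).map (fun i => PySem.Int.mod
        (((pvLoopA n 1 ((List.replicate (n+1) (0:Int)).set 0 1) ((List.replicate (n+1) (0:Int)).set 0 1)).1.getD i 0 +
          (pvLoopA n 1 ((List.replicate (n+1) (0:Int)).set 0 1) ((List.replicate (n+1) (0:Int)).set 0 1)).2.getD i 0) *
          PySem.Int.floordiv (pvMOD + 1) 2) pvMOD) =
      (PySem.List.enumerate ((List.range' 1 n).foldl pvBStep (List.replicate (n+1) (1:Int))) 0).foldl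
        (fun out ix => out ++ [PySem.Int.mod ((ix.2 +
          (if ix.1 = 0 then 1 else if ix.1 = 1 then -1 else 0)) *
          PySem.Int.floordiv (pvMOD + 1) 2) pvMOD]) []
    set b := (List.range' 1 n).foldl pvBStep (List.replicate (n+1) (1:Int)) with hb
    rw [PySem.List.enumerate_eq_map_pyRange b (0:Int),
      PySem.List.foldl_append_singleton_eq_map
        (f := fun ix : Int × Int => PySem.Int.mod ((ix.2 +
          (if ix.1 = 0 then 1 else if ix.1 = 1 then -1 else 0)) *
          PySem.Int.floordiv (pvMOD + 1) 2) pvMOD),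
      PySem.List.len_eq, hblen, PySem.List.pyRange_zero_nat, List.map_map, List.map_map,
      List.nil_append]
    apply List.map_congr_left
    intro i hmem
    have hi : i ≤ n := by
      have := List.mem_range.mp hmem
      omega
    have helem := pvElem n b _ _ (PySem.Int.floordiv (pvMOD + 1) 2)
      (fun j hj => (hloop j hj).1) (fun j hj => (hloop j hj).2)
      (fun j hj => hbval j hj (by omega)) i hi
    rw [helem]
    simp [PySem.List.pyGetD_natCast, Function.comp]

-- ===== VERDICT (by name: the statement is the Claim_ definition above) =====
theorem parity_factor_spec : Claim_equal_parity_factor := by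
  intro N _ hPre
  exact parity_factor_main N hPre
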